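-- pv_equiv track=rewrite | github.com/d14405011-sudo/2026-python | weeks/week-07/solutions/1114405011/10093/q10093.py | solve_core
-- ===== SOURCE A (Python) =====
-- from collections import defaultdict
--
-- def states(m: int) -> list[int]:
--     r = []
--     for s in range(1 << m):
--         if (s & (s << 1)) == 0 and (s & (s << 2)) == 0:
--             r.append(s)
--     return r
--
-- def solve_core(board: list[str]) -> int:
--     n = len(board)
--     m = len(board[0])
--     tm = []
--     for row in board:
--         x = 0
--         for j, ch in enumerate(row):
--             if ch == "P":
--                 x |= 1 << j
--         tm.append(x)
--     st = states(m)
--     pc = {s: s.bit_count() for s in st}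
--     valid = []
--     for i in range(n):
--         valid.append([s for s in st if (s & ~tm[i]) == 0])
--     dp = {(0, 0): 0}
--     for r in range(n):
--         ndp = defaultdict(lambda: -1)
--         for (a, b), v in dp.items():
--             for c in valid[r]:
--                 if (c & b) != 0:
--                     continue
--                 if (c & a) != 0:
--                     continue
--                 nv = v + pc[c]
--                 k = (b, c)
--                 if nv > ndp[k]:
--                     ndp[k] = nv
--         dp = ndp
--     return max(dp.values(), default=0)
-- ===== SOURCE B (Python) =====
-- def states(m: int) -> list[int]:
--     r = []
--     for s in range(1 << m):
--         if (s & (s << 1)) == 0 and (s & (s << 2)) == 0: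
--             r.append(s)
--     return r
--
-- def solve_core(board: list[str]) -> int:
--     # Same precomputation as the original; the DP is replaced by a backward
--     # (suffix) tabulation of the recurrence best-from-row-r-on(prev, prev2).
--     n = len(board)
--     m = len(board[0])
--     tm = []
--     for row in board:
--         x = 0
--         for j, ch in enumerate(row):
--             if ch == "P":
--                 x |= 1 << j
--         tm.append(x)
--     st = states(m)
--     pc = {s: s.bit_count() for s in st}
--     valid = []
--     for i in range(n):
--         valid.append([s for s in st if (s & ~tm[i]) == 0])
--     # f maps (prev, prev2) -> best count obtainable on the remaining rows,
--     # where prev / prev2 are the masks chosen for the two rows just above.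
--     f = {}
--     for r in range(n - 1, -1, -1):
--         ps = valid[r - 1] if r >= 1 else [0]
--         qs = valid[r - 2] if r >= 2 else [0]
--         g = {}
--         for p in ps:
--             for q in qs:
--                 best = -1
--                 for c in valid[r]:
--                     if (c & p) == 0 and (c & q) == 0:
--                         v = pc[c] + (f[(c, p)] if r + 1 < n else 0)
--                         if v > best:
--                             best = v
--                 g[(p, q)] = best
--         f = g
--     return f[(0, 0)] if n > 0 else 0
-- ===== Notes on version B (the rewrite author's own statement) =====
-- stated objective: alternative
-- what changed: The forward dict DP with defaultdict relaxation and a final max over values is replaced by a backward (suffix) tabulation of the recurrence best(r, prev, prev2), computed row by row from the last row up, with the answer read directly at f[(0,0)]; Pre_ only excludes the empty board, on which both programs raise IndexError.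
import Mathlib
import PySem

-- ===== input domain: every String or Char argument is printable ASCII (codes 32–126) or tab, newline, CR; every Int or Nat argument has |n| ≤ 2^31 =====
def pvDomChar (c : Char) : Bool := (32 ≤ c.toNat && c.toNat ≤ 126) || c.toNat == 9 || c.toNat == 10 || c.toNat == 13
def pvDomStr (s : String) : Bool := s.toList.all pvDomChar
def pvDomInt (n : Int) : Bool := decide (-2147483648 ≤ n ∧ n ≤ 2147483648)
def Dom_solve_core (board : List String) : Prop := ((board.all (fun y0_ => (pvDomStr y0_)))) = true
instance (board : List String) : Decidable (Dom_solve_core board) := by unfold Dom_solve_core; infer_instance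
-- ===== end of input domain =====

-- B replaces A's forward dict DP by a backward (suffix) tabulation of the same recurrence;
-- equal return values are proved on every non-empty board (both raise IndexError on []).

-- ===== shared precomputation helpers (identical code in Source A and Source B) =====
-- states(m)
def pvStates (m : Nat) : List Int :=
  (PySem.List.pyRange 0 ((1:Int) <<< m)).foldl (fun r s =>
    if (PySem.Int.band s (s <<< (1:Nat)) == 0) && (PySem.Int.band s (s <<< (2:Nat)) == 0) then
      r ++ [s]
    else r) []

-- the inner loop of the tm computation (one row's bitmask)
def pvRowMask (row : String) : Int :=
  (PySem.List.enumerate row.toList).foldl (fun x jc =>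
    if jc.2 == 'P' then PySem.Int.bor x ((1:Int) <<< jc.1.toNat) else x) 0

def pvTm (board : List String) : List Int :=
  board.foldl (fun tm row => tm ++ [pvRowMask row]) []

-- pc = {s: s.bit_count() for s in st}
def pvPc (st : List Int) : PySem.Dict Int Int :=
  st.foldl (fun d s => d.insert s ((PySem.Int.bitCount s : Int))) PySem.Dict.empty

-- valid[i] = [s for s in st if (s & ~tm[i]) == 0]
def pvValid (n : Int) (st tm : List Int) : List (List Int) :=
  (PySem.List.pyRange 0 n).foldl (fun acc i =>
    acc ++ [st.filter (fun s => PySem.Int.band s (Int.not (PySem.List.pyGetD tm i 0)) == 0)]) []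

-- ===== PORT A =====
-- one round of A's dp loop (body of 'for r in range(n)'); ndp[k] on the defaultdict
-- inserts the default -1 before the comparison, exactly as in Python
def pvStepRow (pc : PySem.Dict Int Int) (v : List Int) (dp : PySem.Dict (Int × Int) Int) :
    PySem.Dict (Int × Int) Int :=
  dp.items.foldl (fun ndp e =>
    v.foldl (fun ndp c =>
      if PySem.Int.band c e.1.2 != 0 then ndp
      else if PySem.Int.band c e.1.1 != 0 then ndp
      else
        let nv := e.2 + pc.getD c 0  -- pc[c]: c ∈ valid[r] ⊆ st, so the key is always present
        let k := (e.1.2, c)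
        let ndp1 := if ndp.contains k then ndp else ndp.insert k (-1)
        if nv > ndp1.getD k (-1) then ndp1.insert k nv else ndp1) ndp)
    PySem.Dict.empty

def solve_core (board : List String) : Int :=
  match PySem.List.pyGet? board 0 with
  | none => 0   -- board[0] raises IndexError on the empty board (excluded by Pre_)
  | some row0 =>
    let n : Int := PySem.List.len board
    let m : Nat := (PySem.Str.len row0).toNat
    let tm := pvTm board
    let st := pvStates m
    let pc := pvPc st
    let valid := pvValid n st tm
    let dp : PySem.Dict (Int × Int) Int := PySem.Dict.empty.insert (0, 0) 0
    let dp := (PySem.List.pyRange 0 n).foldl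
      (fun dp r => pvStepRow pc (PySem.List.pyGetD valid r []) dp) dp
    (PySem.List.max? dp.values (fun x => x)).getD 0

-- ===== PORT B =====
-- body of B's 'for r in range(n - 1, -1, -1)' loop: tabulate best(r, prev, prev2)
def pvBRow (pc : PySem.Dict Int Int) (valid : List (List Int)) (n : Int)
    (f : PySem.Dict (Int × Int) Int) (r : Int) : PySem.Dict (Int × Int) Int :=
  let ps := if 1 ≤ r then PySem.List.pyGetD valid (r - 1) [] else [0]
  let qs := if 2 ≤ r then PySem.List.pyGetD valid (r - 2) [] else [0]
  ps.foldl (fun g p => qs.foldl (fun g q =>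
      let best := (PySem.List.pyGetD valid r []).foldl (fun best c =>
        if PySem.Int.band c p == 0 && PySem.Int.band c q == 0 then
          let v := pc.getD c 0 + (if r + 1 < n then f.getD (c, p) 0 else 0)  -- f[(c,p)] always present
          if v > best then v else best
        else best) (-1)
      g.insert (p, q) best) g) PySem.Dict.empty

def solve_core_alt (board : List String) : Int :=
  match PySem.List.pyGet? board 0 with
  | none => 0   -- len(board[0]) raises IndexError on the empty board (excluded by Pre_)
  | some row0 =>
    let n : Int := PySem.List.len board
    let m : Nat := (PySem.Str.len row0).toNat
    let tm := pvTm board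
    let st := pvStates m
    let pc := pvPc st
    let valid := pvValid n st tm
    let f := (PySem.List.pyRange (n - 1) (-1) (-1)).foldl (pvBRow pc valid n) PySem.Dict.empty
    if 0 < n then f.getD (0, 0) 0 else 0

-- ===== PRECONDITION & SPEC =====
-- Pre_ excludes exactly the empty board, on which A raises IndexError at board[0].
def Pre_solve_core (board : List String) : Prop := board ≠ []
instance (board : List String) : Decidable (Pre_solve_core board) := by
  unfold Pre_solve_core; infer_instance

def pvWitness_solve_core : List String := ["P.P", "...", "PPP"]

def Spec_solve_core (board : List String) (out : Int) : Prop := out = solve_core_alt board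
instance (board : List String) (out : Int) : Decidable (Spec_solve_core board out) := by
  unfold Spec_solve_core; infer_instance

-- ===== CLAIM (what is proved, stated in full; the proofs are below) =====
def Claim_equal_solve_core : Prop :=
  ∀ (board : List String), Dom_solve_core board → Pre_solve_core board →
    Spec_solve_core board (solve_core board)

-- ===== LEMMAS AND PROOFS =====

-- ----- running-max toolkit -----
def pvM (l : List Int) (B : Int) : Int := l.foldl max B

theorem pvM_base (l : List Int) (B : Int) : B ≤ pvM l B :=
  (PySem.List.le_foldl_max l B).1

theorem pvM_el {l : List Int} {y : Int} (h : y ∈ l) (B : Int) : y ≤ pvM l B :=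
  (PySem.List.le_foldl_max l B).2 y h

theorem pvM_le {l : List Int} {B c : Int} (hB : B ≤ c) (h : ∀ y ∈ l, y ≤ c) :
    pvM l B ≤ c := by
  induction l generalizing B with
  | nil => exact hB
  | cons x t ih =>
    exact ih (by have := h x (by simp); omega) (fun y hy => h y (by simp [hy]))

theorem pvM_split (l : List Int) {B C : Int} (h : C ≤ B) :
    pvM l B = max B (pvM l C) := by
  induction l generalizing B C with
  | nil => simp [pvM]; omega
  | cons x t ih =>
    show pvM t (max B x) = max B (pvM t (max C x))
    have h1 : max C x ≤ max B x := by omega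
    rw [ih h1, ih (le_max_right C x)]
    have := pvM_base t (max C x)
    omega

theorem pvM_congr_base {l : List Int} {y : Int} (hy : y ∈ l) {B1 B2 : Int}
    (h1 : B1 ≤ y) (h2 : B2 ≤ y) : pvM l B1 = pvM l B2 := by
  have e1 := pvM_split l (B := B1) (C := min B1 B2) (by omega)
  have e2 := pvM_split l (B := B2) (C := min B1 B2) (by omega)
  have e3 := pvM_el hy (min B1 B2)
  omega

theorem pvM_add (l : List Int) (v B : Int) :
    v + pvM l B = pvM (l.map (fun y => v + y)) (v + B) := by
  induction l generalizing B with
  | nil => rfl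
  | cons x t ih =>
    show v + pvM t (max B x) = pvM (t.map _) (max (v+B) (v+x))
    rw [ih (max B x)]
    congr 1
    omega

theorem pvM_flat {α : Type} (l : List α) (D : α → List Int) {B : Int} (hB : 0 ≤ B) :
    pvM (l.flatMap D) B = pvM (l.map (fun e => pvM (D e) 0)) B := by
  induction l generalizing B with
  | nil => rfl
  | cons e t ih =>
    rw [List.flatMap_cons, List.map_cons]
    show pvM (D e ++ t.flatMap D) B = pvM (t.map _) (max B (pvM (D e) 0))
    rw [pvM, List.foldl_append, ← pvM, ← pvM, pvM_split (D e) hB]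
    exact ih (by have := pvM_base (D e) 0; omega)

-- ----- the relaxation primitive of A's inner loop -----
def pvRelax (d : PySem.Dict (Int × Int) Int) (kx : (Int × Int) × Int) :
    PySem.Dict (Int × Int) Int :=
  let d1 := if d.contains kx.1 then d else d.insert kx.1 (-1)
  if kx.2 > d1.getD kx.1 (-1) then d1.insert kx.1 kx.2 else d1

theorem pvRelax_eq (d : PySem.Dict (Int × Int) Int) (k : Int × Int) {x : Int}
    (hx : 0 ≤ x) :
    pvRelax d (k, x) = match d.get? k with
      | none => d.insert k x
      | some v => if x > v then d.insert k x else d := by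
  unfold pvRelax
  cases h : d.get? k with
  | none =>
    have hc : d.contains k = false := by
      rw [PySem.Dict.contains_eq_isSome_get?, h]; rfl
    simp only [hc, Bool.false_eq_true, if_false, PySem.Dict.getD_insert_self]
    rw [if_pos (by omega)]
    exact PySem.Dict.insert_insert_self d k (-1) x
  | some v =>
    have hc : d.contains k = true := by
      rw [PySem.Dict.contains_eq_isSome_get?, h]; rfl
    simp only [hc, if_true, PySem.Dict.getD_of_get?_eq_some d (-1) h]

theorem pvRelax_nodup (d : PySem.Dict (Int × Int) Int) (kx : (Int × Int) × Int)
    (h : d.keys.Nodup) : (pvRelax d kx).keys.Nodup := by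
  unfold pvRelax
  dsimp only
  split <;> split <;>
    first
      | exact h
      | exact PySem.Dict.nodup_keys_insert _ _ _ h
      | exact PySem.Dict.nodup_keys_insert _ _ _ (PySem.Dict.nodup_keys_insert _ _ _ h)

theorem pvRelax_vals (d : PySem.Dict (Int × Int) Int) (k : Int × Int) {x : Int}
    (hx : 0 ≤ x) (h : ∀ kv ∈ d.items, 0 ≤ kv.2) :
    ∀ kv ∈ (pvRelax d (k, x)).items, 0 ≤ kv.2 := by
  rw [pvRelax_eq d k hx]
  cases hget : d.get? k with
  | none =>
    intro kv hkv
    rcases (PySem.Dict.mem_items_insert _ _ _ _).mp hkv with h1 | h2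
    · rw [h1]; exact hx
    · exact h _ h2.1
  | some v =>
    intro kv hkv0
    have hkv : kv ∈ (if x > v then d.insert k x else d).items := hkv0
    by_cases hxv : x > v
    · rw [if_pos hxv] at hkv
      rcases (PySem.Dict.mem_items_insert _ _ _ _).mp hkv with h1 | h2
      · rw [h1]; exact hx
      · exact h _ h2.1
    · rw [if_neg hxv] at hkv
      exact h _ hkv

theorem pvRelax_interp (d : PySem.Dict (Int × Int) Int) (k : Int × Int) {x : Int}
    (g : Int × Int → Int) (hnd : d.keys.Nodup) (hx : 0 ≤ x) :
    pvM ((pvRelax d (k, x)).items.map (fun kv => kv.2 + g kv.1)) 0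
      = max (pvM (d.items.map (fun kv => kv.2 + g kv.1)) 0) (x + g k) := by
  cases hget : d.get? k with
  | none =>
    have hc : d.contains k = false := by
      rw [PySem.Dict.contains_eq_isSome_get?, hget]; rfl
    have hred : pvRelax d (k, x) = d.insert k x := by
      rw [pvRelax_eq d k hx, hget]
    rw [hred, PySem.Dict.items_insert_of_not_contains d x hc, List.map_append]
    show pvM _ 0 = _
    rw [pvM, List.foldl_append]
    rfl
  | some v =>
    have hc : d.contains k = true := by
      rw [PySem.Dict.contains_eq_isSome_get?, hget]; rfl
    have hkv : (k, v) ∈ d.items := PySem.Dict.mem_items_of_get?_eq_some d hget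
    have hred : pvRelax d (k, x) = if x > v then d.insert k x else d := by
      rw [pvRelax_eq d k hx, hget]
    by_cases hxv : x > v
    · rw [hred, if_pos hxv, PySem.Dict.items_insert_of_contains d x hc]
      have huniq : ∀ p ∈ d.items, p.1 = k → p = (k, v) := by
        intro p hp hp1
        have h2 := PySem.Dict.get?_of_mem_items (d := d) (k := p.1) (v := p.2)
          (by simpa using hp) hnd
        rw [hp1, hget] at h2
        injection h2 with h3
        exact Prod.ext hp1 h3.symm
      have hxmem : x + g k ∈ (List.map (fun p => if (p.1 == k) = true then (k, x) else p)
          d.items).map (fun kv => kv.2 + g kv.1) := by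
        refine List.mem_map.mpr ⟨(k, x), ?_, rfl⟩
        exact List.mem_map.mpr ⟨(k, v), hkv, by simp⟩
      apply le_antisymm
      · apply pvM_le
        · exact le_trans (pvM_base _ 0) (le_max_left _ _)
        · intro y hy
          obtain ⟨pr, hpr, rfl⟩ := List.mem_map.mp hy
          obtain ⟨p, hp, rfl⟩ := List.mem_map.mp hpr
          by_cases hk : p.1 = k
          · simp only [hk, beq_self_eq_true, if_true]
            exact le_max_right _ _
          · rw [if_neg (by simpa using hk)]
            exact le_trans (pvM_el (List.mem_map_of_mem hp) 0) (le_max_left _ _)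
      · apply max_le
        · apply pvM_le
          · exact pvM_base _ 0
          · intro y hy
            obtain ⟨p, hp, rfl⟩ := List.mem_map.mp hy
            by_cases hk : p.1 = k
            · rw [huniq p hp hk]
              show v + g k ≤ _
              calc v + g k ≤ x + g k := by omega
                _ ≤ _ := pvM_el hxmem 0
            · exact pvM_el
                (List.mem_map.mpr ⟨p, List.mem_map.mpr ⟨p, hp, by simp [hk]⟩, rfl⟩) 0
        · exact pvM_el hxmem 0
    · rw [hred, if_neg hxv]
      exact (max_eq_left (le_trans (by omega : x + g k ≤ v + g k)
        (pvM_el (List.mem_map_of_mem hkv) 0))).symm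

-- folding pvRelax over a contribution list
theorem pvR1 (L : List ((Int × Int) × Int)) (d : PySem.Dict (Int × Int) Int)
    (g : Int × Int → Int) (hnd : d.keys.Nodup) (hL : ∀ kx ∈ L, 0 ≤ kx.2) :
    pvM ((L.foldl pvRelax d).items.map (fun kv => kv.2 + g kv.1)) 0
      = pvM (L.map (fun kx => kx.2 + g kx.1))
          (pvM (d.items.map (fun kv => kv.2 + g kv.1)) 0) := by
  induction L generalizing d with
  | nil => rfl
  | cons kx t ih =>
    obtain ⟨k, x⟩ := kx
    rw [List.foldl_cons, List.map_cons,
      ih (pvRelax d (k, x)) (pvRelax_nodup d (k, x) hnd) (fun a ha => hL a (by simp [ha])),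
      pvRelax_interp d k g hnd (hL (k, x) (by simp))]
    rfl

theorem pvR1_nodup (L : List ((Int × Int) × Int)) (d : PySem.Dict (Int × Int) Int)
    (hnd : d.keys.Nodup) : (L.foldl pvRelax d).keys.Nodup := by
  induction L generalizing d with
  | nil => exact hnd
  | cons kx t ih => exact ih _ (pvRelax_nodup d kx hnd)

theorem pvR1_vals (L : List ((Int × Int) × Int)) (d : PySem.Dict (Int × Int) Int)
    (hL : ∀ kx ∈ L, 0 ≤ kx.2) (hd : ∀ kv ∈ d.items, 0 ≤ kv.2) :
    ∀ kv ∈ (L.foldl pvRelax d).items, 0 ≤ kv.2 := by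
  induction L generalizing d with
  | nil => exact hd
  | cons kx t ih =>
    exact ih _ (fun a ha => hL a (by simp [ha]))
      (pvRelax_vals d kx.1 (hL kx (by simp)) hd)

-- ----- B's recurrence as a mathematical function (proof-side only) -----
def pvP (pc : PySem.Dict Int Int) (c : Int) : Int := pc.getD c 0

def pvRecB (pc : PySem.Dict Int Int) : List (List Int) → Int → Int → Int
  | [], _, _ => 0
  | v :: rest, p, q =>
    v.foldl (fun best c =>
      if PySem.Int.band c p == 0 && PySem.Int.band c q == 0 then
        let val := pvP pc c + pvRecB pc rest c p
        if val > best then val else best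
      else best) (-1)

theorem pvRecB_cons (pc : PySem.Dict Int Int) (v : List Int) (rest : List (List Int))
    (p q : Int) :
    pvRecB pc (v :: rest) p q
      = pvM ((v.filter (fun c => PySem.Int.band c p == 0 && PySem.Int.band c q == 0)).map
          (fun c => pvP pc c + pvRecB pc rest c p)) (-1) := by
  rw [pvRecB]
  have hbody : (fun (best c : Int) =>
      if (PySem.Int.band c p == 0 && PySem.Int.band c q == 0) then
        (let val := pvP pc c + pvRecB pc rest c p; if val > best then val else best)
      else best)
      = fun (best c : Int) =>
        if (PySem.Int.band c p == 0 && PySem.Int.band c q == 0) then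
          max best (pvP pc c + pvRecB pc rest c p)
        else best := by
    funext best c
    split
    · dsimp only; split <;> omega
    · rfl
  rw [hbody, PySem.List.foldl_if_eq_foldl_filter, ← List.foldl_map]
  rfl

theorem pv_band_zero_left (x : Int) : PySem.Int.band 0 x = 0 := by
  rw [PySem.Int.band_comm]; exact PySem.Int.band_zero x

theorem pvRecB_nonneg (pc : PySem.Dict Int Int) (Vs : List (List Int))
    (hP : ∀ c, 0 ≤ pvP pc c) (hVs : ∀ V ∈ Vs, (0:Int) ∈ V) (p q : Int) :
    0 ≤ pvRecB pc Vs p q := by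
  induction Vs generalizing p q with
  | nil => simp [pvRecB]
  | cons v rest ih =>
    rw [pvRecB_cons]
    have h0 : (0:Int) ∈ v.filter (fun c => PySem.Int.band c p == 0 && PySem.Int.band c q == 0) := by
      rw [List.mem_filter]
      refine ⟨hVs v (by simp), ?_⟩
      simp [pv_band_zero_left]
    have hy : pvP pc 0 + pvRecB pc rest 0 p
        ≤ pvM ((v.filter _).map (fun c => pvP pc c + pvRecB pc rest c p)) (-1) :=
      pvM_el (List.mem_map_of_mem h0) (-1)
    have := hP 0
    have := ih (fun V hV => hVs V (by simp [hV])) 0 p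
    omega

-- ----- precomputation facts -----
theorem pvGet_build {kappa nu : Type} [BEq kappa] [LawfulBEq kappa] [DecidableEq kappa]
    (L : List kappa) (F : kappa → nu) (d : PySem.Dict kappa nu) (c : kappa) :
    (L.foldl (fun d s => d.insert s (F s)) d).get? c
      = if c ∈ L then some (F c) else d.get? c := by
  induction L generalizing d with
  | nil => simp
  | cons s t ih =>
    rw [List.foldl_cons, ih]
    by_cases hct : c ∈ t
    · simp [hct]
    · by_cases hcs : c = s
      · simp [hcs, PySem.Dict.get?_insert]
      · simp [hct, hcs, PySem.Dict.get?_insert]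

theorem pvP_nonneg (st : List Int) (c : Int) : 0 ≤ pvP (pvPc st) c := by
  unfold pvP pvPc
  rw [PySem.Dict.getD_eq_get?_getD, pvGet_build]
  split
  · exact Int.natCast_nonneg _
  · simp [PySem.Dict.get?_empty]

theorem pvP_zero (st : List Int) (h : (0:Int) ∈ st) : pvP (pvPc st) 0 = 0 := by
  unfold pvP pvPc
  rw [PySem.Dict.getD_eq_get?_getD, pvGet_build, if_pos h]
  simp [PySem.Int.bitCount_zero]

theorem pv_zero_mem_states (m : Nat) : (0:Int) ∈ pvStates m := by
  unfold pvStates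
  rw [PySem.List.foldl_append_if_eq_filter, List.nil_append, List.mem_filter]
  refine ⟨PySem.List.mem_pyRange_one.mpr ⟨le_refl 0, ?_⟩, by decide⟩
  show (0:Int) < ((1 <<< m : Nat) : Int)
  have : (0:Nat) < 1 <<< m := by simp [Nat.one_shiftLeft]
  exact_mod_cast this

theorem pvValid_eq_map (n : Int) (st tm : List Int) :
    pvValid n st tm = (PySem.List.pyRange 0 n).map
      (fun i => st.filter (fun s =>
        PySem.Int.band s (Int.not (PySem.List.pyGetD tm i 0)) == 0)) := by
  unfold pvValid
  rw [PySem.List.foldl_append_singleton_eq_map, List.nil_append]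

theorem pv_zero_mem_valid (m : Nat) (n : Int) (tm : List Int) :
    ∀ V ∈ pvValid n (pvStates m) tm, (0:Int) ∈ V := by
  intro V hV
  rw [pvValid_eq_map] at hV
  obtain ⟨i, _, rfl⟩ := List.mem_map.mp hV
  rw [List.mem_filter]
  refine ⟨pv_zero_mem_states m, by simp [pv_band_zero_left]⟩

theorem pvValid_length (n : Int) (st tm : List Int) :
    (pvValid n st tm).length = n.toNat := by
  rw [pvValid_eq_map, List.length_map, PySem.List.length_pyRange_one]
  omega

-- ----- A's row step as a fold of pvRelax over its contribution list -----
def pvContribs (pc : PySem.Dict Int Int) (v : List Int)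
    (items : List ((Int × Int) × Int)) : List ((Int × Int) × Int) :=
  items.flatMap (fun e =>
    (v.filter (fun c =>
        PySem.Int.band c e.1.2 == 0 && PySem.Int.band c e.1.1 == 0)).map
      (fun c => ((e.1.2, c), e.2 + pvP pc c)))

theorem pvStepRow_eq (pc : PySem.Dict Int Int) (v : List Int)
    (dp : PySem.Dict (Int × Int) Int) :
    pvStepRow pc v dp = (pvContribs pc v dp.items).foldl pvRelax PySem.Dict.empty := by
  unfold pvStepRow pvContribs
  rw [List.foldl_flatMap]
  apply PySem.List.foldl_congr_mem
  intro ndp e _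
  rw [List.foldl_map, ← PySem.List.foldl_if_eq_foldl_filter
    (p := fun c => PySem.Int.band c e.1.2 == 0 && PySem.Int.band c e.1.1 == 0)
    (f := fun acc c => pvRelax acc ((e.1.2, c), e.2 + pvP pc c))]
  apply PySem.List.foldl_congr_mem
  intro acc c _
  by_cases h1 : PySem.Int.band c e.1.2 == 0
  · by_cases h2 : PySem.Int.band c e.1.1 == 0
    · simp only [h1, h2, bne, Bool.not_true, Bool.and_self,
        Bool.false_eq_true, if_false, if_true]
      rfl
    · simp only [h1, h2, bne, Bool.not_true, Bool.not_false, Bool.true_and,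
        Bool.and_false, Bool.false_eq_true, if_false, if_true]
  · simp only [h1, bne, Bool.not_false, Bool.false_and,
      Bool.false_eq_true, if_false, if_true]

theorem pvContribs_nonneg (pc : PySem.Dict Int Int) (v : List Int)
    (items : List ((Int × Int) × Int)) (hPpos : ∀ c, 0 ≤ pvP pc c)
    (hvals : ∀ kv ∈ items, 0 ≤ kv.2) :
    ∀ kx ∈ pvContribs pc v items, 0 ≤ kx.2 := by
  intro kx hkx
  obtain ⟨e, he, hkx2⟩ := List.mem_flatMap.mp hkx
  obtain ⟨c, _, rfl⟩ := List.mem_map.mp hkx2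
  have := hvals e he
  have := hPpos c
  show 0 ≤ e.2 + pvP pc c
  omega

-- ----- A's step rewrites one level of the recurrence -----
theorem pvStep_interp (pc : PySem.Dict Int Int) (V : List Int) (Vs : List (List Int))
    (dp : PySem.Dict (Int × Int) Int)
    (h0 : (0:Int) ∈ V) (hvals : ∀ kv ∈ dp.items, 0 ≤ kv.2)
    (hP0 : pvP pc 0 = 0) (hPpos : ∀ c, 0 ≤ pvP pc c)
    (hVs : ∀ W ∈ Vs, (0:Int) ∈ W) :
    pvM ((pvStepRow pc V dp).items.map
        (fun kv => kv.2 + pvRecB pc Vs kv.1.2 kv.1.1)) 0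
      = pvM (dp.items.map (fun kv => kv.2 + pvRecB pc (V :: Vs) kv.1.2 kv.1.1)) 0 := by
  rw [pvStepRow_eq]
  have h1 := pvR1 (pvContribs pc V dp.items) PySem.Dict.empty
      (fun k => pvRecB pc Vs k.2 k.1) PySem.Dict.nodup_keys_empty
      (pvContribs_nonneg pc V dp.items hPpos hvals)
  simp only [] at h1
  rw [h1]
  show pvM _ (pvM (List.map _ ([] : List ((Int × Int) × Int))) 0) = _
  rw [List.map_nil, show pvM ([] : List Int) 0 = 0 from rfl]
  unfold pvContribs
  rw [List.map_flatMap, pvM_flat dp.items _ (le_refl 0)]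
  have hpoint : ∀ e ∈ dp.items,
      pvM (((V.filter (fun c =>
          PySem.Int.band c e.1.2 == 0 && PySem.Int.band c e.1.1 == 0)).map
            (fun c => ((e.1.2, c), e.2 + pvP pc c))).map
          (fun kx => kx.2 + pvRecB pc Vs kx.1.2 kx.1.1)) 0
        = e.2 + pvRecB pc (V :: Vs) e.1.2 e.1.1 := by
    intro e he
    rw [List.map_map, pvRecB_cons, pvM_add _ e.2 (-1), List.map_map]
    have h0f : (0:Int) ∈ V.filter (fun c =>
        PySem.Int.band c e.1.2 == 0 && PySem.Int.band c e.1.1 == 0) :=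
      List.mem_filter.mpr ⟨h0, by simp [pv_band_zero_left]⟩
    have hy : e.2 + (pvP pc 0 + pvRecB pc Vs 0 e.1.2)
        ∈ (V.filter (fun c =>
            PySem.Int.band c e.1.2 == 0 && PySem.Int.band c e.1.1 == 0)).map
          (fun c => e.2 + (pvP pc c + pvRecB pc Vs c e.1.2)) :=
      List.mem_map_of_mem h0f
    have hrec0 := pvRecB_nonneg pc Vs hPpos hVs 0 e.1.2
    have he2 := hvals e he
    have hL : List.map ((fun kx : (Int × Int) × Int => kx.2 + pvRecB pc Vs kx.1.2 kx.1.1)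
          ∘ fun c => ((e.1.2, c), e.2 + pvP pc c))
        (V.filter (fun c => PySem.Int.band c e.1.2 == 0 && PySem.Int.band c e.1.1 == 0))
        = List.map (fun c => e.2 + (pvP pc c + pvRecB pc Vs c e.1.2))
          (V.filter (fun c => PySem.Int.band c e.1.2 == 0 && PySem.Int.band c e.1.1 == 0)) :=
      List.map_congr_left (fun c _ => by
        show (e.2 + pvP pc c) + pvRecB pc Vs c e.1.2 = _
        ring)
    have hR : List.map ((fun y => e.2 + y) ∘ fun c => pvP pc c + pvRecB pc Vs c e.1.2)
        (V.filter (fun c => PySem.Int.band c e.1.2 == 0 && PySem.Int.band c e.1.1 == 0))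
        = List.map (fun c => e.2 + (pvP pc c + pvRecB pc Vs c e.1.2))
          (V.filter (fun c => PySem.Int.band c e.1.2 == 0 && PySem.Int.band c e.1.1 == 0)) :=
      List.map_congr_left (fun c _ => rfl)
    rw [hL, hR]
    exact pvM_congr_base hy (by omega) (by omega)
  rw [List.map_congr_left hpoint]

-- ----- A's whole loop computes the recurrence -----
theorem pvAmain (pc : PySem.Dict Int Int) (Vs : List (List Int))
    (dp : PySem.Dict (Int × Int) Int)
    (hVs : ∀ V ∈ Vs, (0:Int) ∈ V) (hvals : ∀ kv ∈ dp.items, 0 ≤ kv.2)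
    (hnd : dp.keys.Nodup) (hP0 : pvP pc 0 = 0) (hPpos : ∀ c, 0 ≤ pvP pc c) :
    (PySem.List.max? (Vs.foldl (fun d v => pvStepRow pc v d) dp).values
        (fun x => x)).getD 0
      = pvM (dp.items.map (fun kv => kv.2 + pvRecB pc Vs kv.1.2 kv.1.1)) 0 := by
  induction Vs generalizing dp with
  | nil =>
    have hmapeq : dp.items.map (fun kv => kv.2 + pvRecB pc [] kv.1.2 kv.1.1)
        = dp.values := by
      simp [PySem.Dict.values, pvRecB]
    rw [List.foldl_nil, hmapeq]
    cases hl : dp.values with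
    | nil => rfl
    | cons x t =>
      rw [PySem.List.max?_id_cons]
      have hx : 0 ≤ x := by
        have : x ∈ dp.values := by rw [hl]; simp
        simp only [PySem.Dict.values] at this
        obtain ⟨kv, hkv, hkv2⟩ := List.mem_map.mp this
        have := hvals kv hkv
        omega
      show t.foldl max x = t.foldl max (max 0 x)
      rw [max_eq_right hx]
  | cons V Vs ih =>
    rw [List.foldl_cons]
    rw [ih (pvStepRow pc V dp)
      (fun W hW => hVs W (by simp [hW]))
      (by rw [pvStepRow_eq]
          exact pvR1_vals _ _ (pvContribs_nonneg pc V dp.items hPpos hvals)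
            (fun kv hkv => by cases hkv))
      (by rw [pvStepRow_eq]; exact pvR1_nodup _ _ PySem.Dict.nodup_keys_empty)]
    exact pvStep_interp pc V Vs dp (hVs V (by simp)) hvals hP0 hPpos
      (fun W hW => hVs W (by simp [hW]))

-- ----- B-side: the tabulation computes the recurrence -----
def pvPS (valid : List (List Int)) (r : Int) : List Int :=
  if 1 ≤ r then PySem.List.pyGetD valid (r - 1) [] else [0]
def pvQS (valid : List (List Int)) (r : Int) : List Int :=
  if 2 ≤ r then PySem.List.pyGetD valid (r - 2) [] else [0]

def pvBInv (pc : PySem.Dict Int Int) (valid : List (List Int))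
    (f : PySem.Dict (Int × Int) Int) (r : Int) : Prop :=
  0 ≤ r → r < (valid.length : Int) → ∀ p q, p ∈ pvPS valid r → q ∈ pvQS valid r →
    f.getD (p, q) 0 = pvRecB pc (valid.drop r.toNat) p q

theorem pvGet_nested_inner (F : Int → Int → Int) (p : Int) (qs : List Int)
    (g : PySem.Dict (Int × Int) Int) (k : Int × Int) :
    (qs.foldl (fun g q => g.insert (p, q) (F p q)) g).get? k
      = if k.1 = p ∧ k.2 ∈ qs then some (F p k.2) else g.get? k := by
  induction qs generalizing g with
  | nil => simp
  | cons q t ih =>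
    rw [List.foldl_cons, ih]
    by_cases h1 : k.1 = p ∧ k.2 ∈ t
    · rw [if_pos h1, if_pos ⟨h1.1, by simp [h1.2]⟩]
    · rw [if_neg h1, PySem.Dict.get?_insert]
      by_cases h2 : k = (p, q)
      · subst h2
        rw [if_pos rfl, if_pos ⟨rfl, by simp⟩]
      · rw [if_neg h2]
        rw [if_neg (by
          rintro ⟨ha, hb⟩
          rcases List.mem_cons.mp hb with hb | hb
          · exact h2 (Prod.ext ha hb)
          · exact h1 ⟨ha, hb⟩)]

theorem pvGet_nested (F : Int → Int → Int) (ps qs : List Int)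
    (g0 : PySem.Dict (Int × Int) Int) (k : Int × Int) :
    (ps.foldl (fun g p => qs.foldl (fun g q => g.insert (p, q) (F p q)) g) g0).get? k
      = if k.1 ∈ ps ∧ k.2 ∈ qs then some (F k.1 k.2) else g0.get? k := by
  induction ps generalizing g0 with
  | nil => simp
  | cons p t ih =>
    rw [List.foldl_cons, ih, pvGet_nested_inner]
    by_cases h1 : k.1 ∈ t ∧ k.2 ∈ qs
    · rw [if_pos h1, if_pos ⟨by simp [h1.1], h1.2⟩]
    · rw [if_neg h1]
      by_cases h2 : k.1 = p ∧ k.2 ∈ qs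
      · rw [if_pos h2, if_pos ⟨by simp [h2.1], h2.2⟩, h2.1]
      · rw [if_neg h2, if_neg (by
          rintro ⟨ha, hb⟩
          rcases List.mem_cons.mp ha with ha | ha
          · exact h2 ⟨ha, hb⟩
          · exact h1 ⟨ha, hb⟩)]

theorem pvBstep (pc : PySem.Dict Int Int) (valid : List (List Int))
    (f : PySem.Dict (Int × Int) Int) (r : Int) (hr0 : 0 ≤ r)
    (hrn : r < (valid.length : Int)) (hinv : pvBInv pc valid f (r + 1)) :
    pvBInv pc valid (pvBRow pc valid (valid.length : Int) f r) r := by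
  intro _ _ p q hp hq
  unfold pvBRow
  rw [PySem.Dict.getD_eq_get?_getD]
  rw [pvGet_nested (F := fun p q => (PySem.List.pyGetD valid r []).foldl (fun best c =>
      if PySem.Int.band c p == 0 && PySem.Int.band c q == 0 then
        let v := pc.getD c 0 +
          (if r + 1 < (valid.length : Int) then f.getD (c, p) 0 else 0)
        if v > best then v else best
      else best) (-1))]
  rw [if_pos ⟨hp, hq⟩]
  show (PySem.List.pyGetD valid r []).foldl _ (-1) = _
  have hrnat : r.toNat < valid.length := by omega
  have hvr : PySem.List.pyGetD valid r [] = valid[r.toNat] :=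
    PySem.List.pyGetD_eq_getElem valid [] hr0 hrn
  have hdrop : valid.drop r.toNat = valid[r.toNat] :: valid.drop (r.toNat + 1) :=
    List.drop_eq_getElem_cons hrnat
  rw [hdrop, pvRecB, hvr]
  apply PySem.List.foldl_congr_mem
  intro best c hc
  have hX : (if r + 1 < (valid.length : Int) then f.getD (c, p) 0 else 0)
      = pvRecB pc (valid.drop (r.toNat + 1)) c p := by
    by_cases hn : r + 1 < (valid.length : Int)
    · rw [if_pos hn]
      have hps1 : c ∈ pvPS valid (r + 1) := by
        unfold pvPS
        rw [if_pos (by omega), show r + 1 - 1 = r from by ring, hvr]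
        exact hc
      have hqs1 : p ∈ pvQS valid (r + 1) := by
        unfold pvQS
        by_cases h1 : 1 ≤ r
        · rw [if_pos (by omega), show r + 1 - 2 = r - 1 from by ring]
          unfold pvPS at hp
          rwa [if_pos h1] at hp
        · rw [if_neg (by omega)]
          unfold pvPS at hp
          rwa [if_neg h1] at hp
      have := hinv (by omega) hn c p hps1 hqs1
      rwa [show (r + 1).toNat = r.toNat + 1 from by omega] at this
    · rw [if_neg hn]
      rw [List.drop_eq_nil_of_le (by omega), pvRecB]
  rw [hX]
  rfl

theorem pvBmain (pc : PySem.Dict Int Int) (valid : List (List Int)) :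
    ∀ (k : Nat) (f : PySem.Dict (Int × Int) Int), k ≤ valid.length →
      pvBInv pc valid f (k : Int) →
      pvBInv pc valid (List.foldl (pvBRow pc valid (valid.length : Int)) f
        (PySem.List.pyRange ((k : Int) - 1) (-1) (-1))) 0 := by
  intro k
  induction k with
  | zero =>
    intro f _ hinv
    rw [PySem.List.pyRange_neg_one_eq_nil (by omega)]
    exact hinv
  | succ k ih =>
    intro f hk hinv
    rw [show ((k + 1 : Nat) : Int) - 1 = (k : Int) from by push_cast; ring,
      PySem.List.pyRange_neg_one_cons (by omega), List.foldl_cons]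
    apply ih _ (by omega)
    apply pvBstep pc valid f (k : Int) (by omega) (by exact_mod_cast hk)
    rwa [show ((k + 1 : Nat) : Int) = (k : Int) + 1 from by push_cast; ring] at hinv

-- ===== VERDICT (by name: the statement is the Claim_ definition above) =====


theorem solve_core_spec : Claim_equal_solve_core := by
  unfold Claim_equal_solve_core
  intro board _ hpre
  unfold Spec_solve_core
  cases board with
  | nil => exact absurd rfl hpre
  | cons row0 rest =>
    unfold solve_core solve_core_alt
    rw [PySem.List.pyGet?_zero_cons]
    simp only []
    set m : Nat := (PySem.Str.len row0).toNat with hm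
    set st : List Int := pvStates m with hst
    set tm : List Int := pvTm (row0 :: rest) with htm
    set pc : PySem.Dict Int Int := pvPc st with hpc
    set n : Int := PySem.List.len (row0 :: rest) with hn
    set valid : List (List Int) := pvValid n st tm with hvalid
    have hnval : n = ((row0 :: rest).length : Int) := by
      rw [hn, PySem.List.len_eq]
    have hvl : n = (valid.length : Int) := by
      rw [hvalid, pvValid_length]
      omega
    have hnpos : 0 < n := by rw [hnval]; simp
    have hP0 : pvP pc 0 = 0 := pvP_zero st (pv_zero_mem_states m)
    have hPpos : ∀ c, 0 ≤ pvP pc c := pvP_nonneg st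
    have hVs : ∀ V ∈ valid, (0:Int) ∈ V := pv_zero_mem_valid m n tm
    -- A side
    have hnlen : n = PySem.List.len valid := by
      rw [PySem.List.len_eq]; exact hvl
    rw [hnlen,
      ← List.foldl_map (f := fun j => PySem.List.pyGetD valid j [])
        (g := fun d v => pvStepRow pc v d),
      PySem.List.map_pyGetD_pyRange_zero]
    have hitems : ((PySem.Dict.empty : PySem.Dict (Int × Int) Int).insert (0, 0) 0).items
        = [(((0:Int), (0:Int)), (0:Int))] := by
      rw [PySem.Dict.items_insert_of_not_contains _ _ (PySem.Dict.contains_empty _)]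
      rfl
    rw [pvAmain pc valid _ hVs
      (by intro kv hkv; rw [hitems] at hkv; simp at hkv; simp [hkv])
      (PySem.Dict.nodup_keys_insert _ _ _ PySem.Dict.nodup_keys_empty)
      hP0 hPpos]
    rw [hitems]
    have hrec0 := pvRecB_nonneg pc valid hPpos hVs 0 0
    have hAside : pvM ([(((0:Int), (0:Int)), (0:Int))].map
        (fun kv => kv.2 + pvRecB pc valid kv.1.2 kv.1.1)) 0
        = pvRecB pc valid 0 0 := by
      show max 0 (0 + pvRecB pc valid 0 0) = pvRecB pc valid 0 0
      omega
    rw [hAside]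
    -- B side
    rw [if_pos (by rw [← hnlen]; exact hnpos)]
    have hinv0 : pvBInv pc valid (PySem.Dict.empty) ((valid.length : Nat) : Int) := by
      intro _ h2 _ _ _ _
      omega
    have hfin := pvBmain pc valid valid.length PySem.Dict.empty (le_refl _) hinv0
    have hlen0 : (0:Int) < (valid.length : Int) := by omega
    have h00 : (0:Int) ∈ pvPS valid 0 := by unfold pvPS; rw [if_neg (by omega)]; simp
    have h00' : (0:Int) ∈ pvQS valid 0 := by unfold pvQS; rw [if_neg (by omega)]; simp
    have := hfin (le_refl 0) hlen0 0 0 h00 h00'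
    rw [show ((0:Int)).toNat = 0 from rfl, List.drop_zero] at this
    rw [show PySem.List.len valid - 1 = (valid.length : Int) - 1 from by
      rw [PySem.List.len_eq]]
    exact this.symm ▸ rfl
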